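-- pv_equiv track=rewrite | github.com/Team-Aquarius-00/major_project | backend/app/utils/helpers.py | generate_alert_summary
-- ===== SOURCE A (Python) =====
-- from typing import Dict, Any
--
-- def generate_alert_summary(alerts: list) -> Dict[str, Any]:
--     """Generate summary statistics from alerts"""
--     summary = {
--         'total_alerts': len(alerts),
--         'high_severity': len([a for a in alerts if a.get('severity') == 'high']),
--         'medium_severity': len([a for a in alerts if a.get('severity') == 'medium']),
--         'low_severity': len([a for a in alerts if a.get('severity') == 'low']),
--         'gaze_alerts': len([a for a in alerts if a.get('type') == 'gaze_alert']),
--         'tab_switches': len([a for a in alerts if a.get('type') == 'tab_switch']),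
--         'object_detections': len([a for a in alerts if a.get('type') == 'object_detected']),
--     }
--     return summary
-- ===== SOURCE B (Python) =====
-- def generate_alert_summary(alerts: list):
--     """Generate summary statistics from alerts (single aggregating pass instead of seven filtering scans)."""
--     sev_counts = {}
--     type_counts = {}
--     for a in alerts:
--         s = a.get('severity')
--         sev_counts[s] = sev_counts.get(s, 0) + 1
--         t = a.get('type')
--         type_counts[t] = type_counts.get(t, 0) + 1
--     return {
--         'total_alerts': len(alerts),
--         'high_severity': sev_counts.get('high', 0),
--         'medium_severity': sev_counts.get('medium', 0),
--         'low_severity': sev_counts.get('low', 0),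
--         'gaze_alerts': type_counts.get('gaze_alert', 0),
--         'tab_switches': type_counts.get('tab_switch', 0),
--         'object_detections': type_counts.get('object_detected', 0),
--     }
-- ===== Notes on version B (the rewrite author's own statement) =====
-- stated objective: alternative
-- what changed: Replaces A's seven separate filtering scans over the alert list with one pass that maintains two counting dicts (severity and type) and reads the six counts out afterwards.
import Mathlib
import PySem

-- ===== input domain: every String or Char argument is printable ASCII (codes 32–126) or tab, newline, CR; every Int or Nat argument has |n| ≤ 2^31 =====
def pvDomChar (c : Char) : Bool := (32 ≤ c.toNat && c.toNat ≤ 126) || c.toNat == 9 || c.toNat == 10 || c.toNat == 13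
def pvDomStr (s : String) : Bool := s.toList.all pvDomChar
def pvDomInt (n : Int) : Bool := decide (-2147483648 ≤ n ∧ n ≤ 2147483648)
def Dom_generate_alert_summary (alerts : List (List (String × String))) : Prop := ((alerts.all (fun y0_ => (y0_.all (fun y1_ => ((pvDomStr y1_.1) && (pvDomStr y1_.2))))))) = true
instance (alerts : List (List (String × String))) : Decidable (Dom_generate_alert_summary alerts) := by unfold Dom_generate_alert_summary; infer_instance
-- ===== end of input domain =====

-- ===== PORT A =====
-- B replaces A's seven filtering scans with one counting pass over the alerts (two counting dicts).
-- a.get(k) on an insertion-ordered dict = first match in the association list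
def pyGetStr (a : List (String × String)) (k : String) : Option String :=
  (a.find? (fun p => p.1 == k)).map (·.2)

def generate_alert_summary (alerts : List (List (String × String))) : List (String × Int) :=
  [("total_alerts", (alerts.length : Int)),
   ("high_severity", ((alerts.filter (fun a => pyGetStr a "severity" == some "high")).length : Int)),
   ("medium_severity", ((alerts.filter (fun a => pyGetStr a "severity" == some "medium")).length : Int)),
   ("low_severity", ((alerts.filter (fun a => pyGetStr a "severity" == some "low")).length : Int)),
   ("gaze_alerts", ((alerts.filter (fun a => pyGetStr a "type" == some "gaze_alert")).length : Int)),
   ("tab_switches", ((alerts.filter (fun a => pyGetStr a "type" == some "tab_switch")).length : Int)),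
   ("object_detections", ((alerts.filter (fun a => pyGetStr a "type" == some "object_detected")).length : Int))]

-- ===== PORT B =====
def generate_alert_summary_alt (alerts : List (List (String × String))) : List (String × Int) :=
  let st := alerts.foldl
    (fun (st : PySem.Dict (Option String) Int × PySem.Dict (Option String) Int) a =>
      let st := (st.1.modify (pyGetStr a "severity") 0 (· + 1), st.2)
      (st.1, st.2.modify (pyGetStr a "type") 0 (· + 1)))
    (PySem.Dict.empty, PySem.Dict.empty)
  [("total_alerts", (alerts.length : Int)),
   ("high_severity", st.1.getD (some "high") 0),
   ("medium_severity", st.1.getD (some "medium") 0),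
   ("low_severity", st.1.getD (some "low") 0),
   ("gaze_alerts", st.2.getD (some "gaze_alert") 0),
   ("tab_switches", st.2.getD (some "tab_switch") 0),
   ("object_detections", st.2.getD (some "object_detected") 0)]

-- ===== PRECONDITION & SPEC =====
def Spec_generate_alert_summary (alerts : List (List (String × String))) (out : List (String × Int)) : Prop := out = generate_alert_summary_alt alerts
instance (alerts : List (List (String × String))) (out : List (String × Int)) : Decidable (Spec_generate_alert_summary alerts out) := by unfold Spec_generate_alert_summary; infer_instance

-- ===== CLAIM (what is proved, stated in full; the proofs are below) =====
def Claim_equal_generate_alert_summary : Prop := ∀ (alerts : List (List (String × String))), Dom_generate_alert_summary alerts → Spec_generate_alert_summary alerts (generate_alert_summary alerts)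

-- ===== LEMMAS AND PROOFS =====

-- the paired fold runs the two counting folds componentwise
theorem pairFold_eq (alerts : List (List (String × String)))
    (d1 d2 : PySem.Dict (Option String) Int) :
    alerts.foldl
      (fun (st : PySem.Dict (Option String) Int × PySem.Dict (Option String) Int) a =>
        let st := (st.1.modify (pyGetStr a "severity") 0 (· + 1), st.2)
        (st.1, st.2.modify (pyGetStr a "type") 0 (· + 1)))
      (d1, d2)
    = (alerts.foldl (fun d a => d.modify (pyGetStr a "severity") 0 (· + 1)) d1,
       alerts.foldl (fun d a => d.modify (pyGetStr a "type") 0 (· + 1)) d2) := by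
  induction alerts generalizing d1 d2 with
  | nil => rfl
  | cons a rest ih => simp [List.foldl_cons, ih]

-- a counting fold keyed through g, read back at v, counts the filter
theorem getD_countFold (g : List (String × String) → Option String)
    (alerts : List (List (String × String))) (v : Option String) :
    (alerts.foldl (fun d a => d.modify (g a) 0 (· + 1)) PySem.Dict.empty).getD v 0
    = ((alerts.filter (fun a => g a == v)).length : Int) := by
  have h := PySem.Dict.getD_foldl_modify_add_one (l := alerts.map g)
    (d := (PySem.Dict.empty : PySem.Dict (Option String) Int)) (v := v)
  rw [List.foldl_map] at h
  rw [h]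
  simp [PySem.Dict.getD, PySem.Dict.empty, List.count_eq_countP,
    Function.comp_def, List.countP_eq_length_filter, List.filter_map, PySem.Dict.get?]

-- ===== VERDICT (by name: the statement is the Claim_ definition above) =====
theorem generate_alert_summary_spec : Claim_equal_generate_alert_summary := by
  intro alerts _
  show _ = _
  simp only [generate_alert_summary, generate_alert_summary_alt, pairFold_eq,
    getD_countFold]
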